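-- pv_equiv track=rewrite | github.com/joshm1243/Tension-Cosmos | services/scripts/splitting.py | PLM_SC_SPLIT_LOC
-- ===== SOURCE A (Python) =====
-- def PLM_SC_SPLIT_LOC(tagged_script):
--
--     ## Split based on location
--     script = []
--     section = []
--     for tagged_line in tagged_script:
--         if tagged_line["tag"] == "location":
--             script.append(section)
--             section = []
--         section.append(tagged_line)
--     return script
-- ===== SOURCE B (Python) =====
-- def PLM_SC_SPLIT_LOC(tagged_script):
--     # Single reverse pass: sections start at location tags; the chunk after the
--     # last location tag (scanned first here) is dropped, matching the original.
--     out = []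
--     cur = []
--     seen = False
--     for line in reversed(tagged_script):
--         if line["tag"] == "location":
--             if seen:
--                 out.append([line] + cur)
--             else:
--                 seen = True
--             cur = []
--         else:
--             cur = [line] + cur
--     if seen:
--         out.append(cur)
--     out.reverse()
--     return out
-- ===== Notes on version B (the rewrite author's own statement) =====
-- stated objective: alternative
-- what changed: A scans forward appending each finished section and implicitly drops the trailing one; B scans the list once in reverse, explicitly skipping the chunk after the last location tag and prepending lines, then reverses the collected sections.
import Mathlib
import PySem

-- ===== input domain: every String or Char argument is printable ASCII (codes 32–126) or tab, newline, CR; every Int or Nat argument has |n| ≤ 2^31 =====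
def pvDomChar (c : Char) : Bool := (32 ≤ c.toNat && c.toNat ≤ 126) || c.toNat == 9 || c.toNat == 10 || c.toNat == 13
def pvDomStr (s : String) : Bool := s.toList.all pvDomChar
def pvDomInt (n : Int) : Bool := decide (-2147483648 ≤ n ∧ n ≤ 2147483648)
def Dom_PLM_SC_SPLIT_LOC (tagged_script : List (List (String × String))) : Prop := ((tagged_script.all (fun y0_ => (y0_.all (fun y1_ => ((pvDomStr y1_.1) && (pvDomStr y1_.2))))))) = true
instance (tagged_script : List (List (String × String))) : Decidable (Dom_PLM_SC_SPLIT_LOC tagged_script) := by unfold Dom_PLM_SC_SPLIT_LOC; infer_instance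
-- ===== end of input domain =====

-- B replaces A's forward scan (which appends each finished section and silently
-- drops the trailing one) by a single reverse scan that skips the trailing chunk
-- explicitly and prepends; objective: alternative decomposition, same cost.

-- shared helper: tagged_line["tag"] == "location" (dict lookup = first match)
def pvIsLoc (l : List (String × String)) : Bool :=
  (l.find? (fun kv => kv.1 == "tag")).map (·.2) == some "location"

-- ===== PORT A =====
def pvLoopA : List (List (String × String)) → List (List (List (String × String))) →
    List (List (String × String)) → List (List (List (String × String)))
  | [], script, _ => script
  | l :: rest, script, sec =>
    if pvIsLoc l then pvLoopA rest (script ++ [sec]) ([] ++ [l])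
    else pvLoopA rest script (sec ++ [l])

def PLM_SC_SPLIT_LOC (tagged_script : List (List (String × String))) : List (List (List (String × String))) :=
  pvLoopA tagged_script [] []

-- ===== PORT B =====
def pvStepB (st : List (List (List (String × String))) × List (List (String × String)) × Bool)
    (l : List (String × String)) :
    List (List (List (String × String))) × List (List (String × String)) × Bool :=
  match st with
  | (out, cur, seen) =>
    if pvIsLoc l then
      if seen then (out ++ [l :: cur], [], true) else (out, [], true)
    else (out, l :: cur, seen)

def PLM_SC_SPLIT_LOC_alt (tagged_script : List (List (String × String))) : List (List (List (String × String))) :=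
  match tagged_script.reverse.foldl pvStepB ([], [], false) with
  | (out, cur, seen) => (if seen then out ++ [cur] else out).reverse

-- ===== PRECONDITION & SPEC =====
-- Pre_ excludes exactly the inputs where a line has no "tag" key, on which the Python A raises KeyError.
def Pre_PLM_SC_SPLIT_LOC (tagged_script : List (List (String × String))) : Prop :=
  (tagged_script.all (fun l => l.any (fun kv => kv.1 == "tag"))) = true
instance (tagged_script : List (List (String × String))) : Decidable (Pre_PLM_SC_SPLIT_LOC tagged_script) := by
  unfold Pre_PLM_SC_SPLIT_LOC; infer_instance

def pvWitness_PLM_SC_SPLIT_LOC : (List (List (String × String))) :=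
  [[("tag", "location"), ("line", "EXT. PARK")], [("tag", "dialogue"), ("line", "hi")]]

def Spec_PLM_SC_SPLIT_LOC (tagged_script : List (List (String × String))) (out : List (List (List (String × String)))) : Prop := out = PLM_SC_SPLIT_LOC_alt tagged_script
instance (tagged_script : List (List (String × String))) (out : List (List (List (String × String)))) : Decidable (Spec_PLM_SC_SPLIT_LOC tagged_script out) := by unfold Spec_PLM_SC_SPLIT_LOC; infer_instance

-- ===== CLAIM (what is proved, stated in full; the proofs are below) =====
def Claim_equal_PLM_SC_SPLIT_LOC : Prop := ∀ (tagged_script : List (List (String × String))), Dom_PLM_SC_SPLIT_LOC tagged_script → Pre_PLM_SC_SPLIT_LOC tagged_script → Spec_PLM_SC_SPLIT_LOC tagged_script (PLM_SC_SPLIT_LOC tagged_script)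

-- ===== LEMMAS AND PROOFS =====

-- reference splitter: the sections of `ts` when the running section starts as `sec`
def pvSplit : List (List (String × String)) → List (List (String × String)) → List (List (List (String × String)))
  | [], _ => []
  | l :: rest, sec => if pvIsLoc l then sec :: pvSplit rest [l] else pvSplit rest (sec ++ [l])

theorem pvLoopA_eq (ts : List (List (String × String)))
    (script : List (List (List (String × String)))) (sec : List (List (String × String))) :
    pvLoopA ts script sec = script ++ pvSplit ts sec := by
  induction ts generalizing script sec with
  | nil => simp [pvLoopA, pvSplit]
  | cons l rest ih =>
    by_cases h : pvIsLoc l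
    · simp [pvLoopA, pvSplit, h, ih]
    · simp [pvLoopA, pvSplit, h, ih]

theorem pvFoldrB_inv (ts : List (List (String × String))) :
    ((ts.foldr (fun l st => pvStepB st l) ([], [], false)).2.2 = false →
        (ts.foldr (fun l st => pvStepB st l) ([], [], false)).1 = []) ∧
      ∀ sec, pvSplit ts sec =
        if (ts.foldr (fun l st => pvStepB st l) ([], [], false)).2.2 then
          (sec ++ (ts.foldr (fun l st => pvStepB st l) ([], [], false)).2.1) ::
            (ts.foldr (fun l st => pvStepB st l) ([], [], false)).1.reverse
        else [] := by
  induction ts with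
  | nil => exact ⟨fun _ => rfl, fun sec => by simp [pvSplit]⟩
  | cons l rest ih =>
    obtain ⟨hnil, hsp⟩ := ih
    rw [List.foldr_cons]
    rcases hr : rest.foldr (fun l st => pvStepB st l) ([], [], false) with ⟨out, cur, seen⟩
    rw [hr] at hnil hsp
    by_cases hl : pvIsLoc l
    · cases seen with
      | false =>
        refine ⟨fun _ => ?_, fun sec => ?_⟩ <;>
          simp [pvStepB, hl, pvSplit, hsp, hnil rfl]
      | true =>
        refine ⟨fun hc => ?_, fun sec => ?_⟩
        · simp [pvStepB, hl] at hc
        · simp [pvStepB, hl, pvSplit, hsp]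
    · refine ⟨fun hc => ?_, fun sec => ?_⟩
      · simp only [pvStepB, hl, Bool.false_eq_true, if_false] at hc ⊢
        exact hnil hc
      · rw [pvSplit, if_neg hl, hsp (sec ++ [l])]
        simp [pvStepB, hl]

theorem PLM_SC_SPLIT_LOC_eq_split (ts : List (List (String × String))) :
    PLM_SC_SPLIT_LOC ts = pvSplit ts [] := by
  simp [PLM_SC_SPLIT_LOC, pvLoopA_eq]

theorem PLM_SC_SPLIT_LOC_alt_eq_split (ts : List (List (String × String))) :
    PLM_SC_SPLIT_LOC_alt ts = pvSplit ts [] := by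
  unfold PLM_SC_SPLIT_LOC_alt
  rw [List.foldl_reverse]
  obtain ⟨hnil, hsp⟩ := pvFoldrB_inv ts
  rcases hr : ts.foldr (fun l st => pvStepB st l) ([], [], false) with ⟨out, cur, seen⟩
  rw [hr] at hnil hsp
  rw [hsp []]
  cases seen with
  | false =>
    simp only [Bool.false_eq_true, if_false]
    simpa using hnil rfl
  | true => simp

-- ===== VERDICT (by name: the statement is the Claim_ definition above) =====
theorem PLM_SC_SPLIT_LOC_spec : Claim_equal_PLM_SC_SPLIT_LOC := by
  intro ts _ _
  unfold Spec_PLM_SC_SPLIT_LOC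
  rw [PLM_SC_SPLIT_LOC_eq_split, PLM_SC_SPLIT_LOC_alt_eq_split]
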